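-- pv_equiv track=rewrite | github.com/KimDong-gue/Algorithm_programmers | 프로그래머스/unrated/181884. n보다 커질 때까지 더하기/n보다 커질 때까지 더하기.py | solution
-- ===== SOURCE A (Python) =====
-- def solution(numbers, n):
--     a=[]
--     for i in numbers:
--         a.append(i)
--         b=sum(a)
--         if b>n:
--             return b
--             break
-- ===== SOURCE B (Python) =====
-- def solution(numbers, n):
--     # phase 1: build the full table of cumulative sums with one running total
--     prefixes = []
--     total = 0
--     for x in numbers:
--         total += x
--         prefixes.append(total)
--     # phase 2: linear search for the first prefix sum strictly greater than n
--     for p in prefixes: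
--         if p > n:
--             return p
--     return None
-- ===== Notes on version B (the rewrite author's own statement) =====
-- stated objective: faster
-- what changed: A re-sums the whole growing list with sum(a) on every iteration (quadratic); B builds the prefix-sum table once with a running total and then searches it in a separate linear pass.
-- outside the precondition, e.g. on solution([1], 5): A returns None, B returns None
import Mathlib
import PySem

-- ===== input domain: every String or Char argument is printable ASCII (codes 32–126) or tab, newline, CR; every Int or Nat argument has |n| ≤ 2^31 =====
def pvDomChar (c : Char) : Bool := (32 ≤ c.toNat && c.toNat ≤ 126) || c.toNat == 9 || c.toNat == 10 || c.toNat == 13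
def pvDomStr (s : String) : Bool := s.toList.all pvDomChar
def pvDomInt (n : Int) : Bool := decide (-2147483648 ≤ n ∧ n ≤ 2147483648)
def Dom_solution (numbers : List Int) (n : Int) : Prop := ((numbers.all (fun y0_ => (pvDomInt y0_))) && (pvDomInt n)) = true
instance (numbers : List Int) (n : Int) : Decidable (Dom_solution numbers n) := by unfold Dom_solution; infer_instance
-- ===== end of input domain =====

-- B replaces A's quadratic re-summation loop by a prefix-sum table built once plus a separate linear search.

-- ===== PORT A =====
-- A's loop: keep list a, append i, recompute b = sum(a) each step; return b on b > n.
-- Python returns None when the loop ends; that case is outside Pre_solution, getD 0 there.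
def solutionAuxA (n : Int) (a : List Int) : List Int → Option Int
  | [] => none
  | i :: rest =>
      let a' := a ++ [i]
      let b := a'.sum
      if b > n then some b else solutionAuxA n a' rest

def solution (numbers : List Int) (n : Int) : Int :=
  (solutionAuxA n [] numbers).getD 0

-- ===== PORT B =====
-- phase 1 of Source B: running total, build prefixes list in order
def buildPrefixes (total : Int) : List Int → List Int
  | [] => []
  | x :: rest => (total + x) :: buildPrefixes (total + x) rest

-- phase 2 of Source B: first element strictly greater than n, None if absent
def firstGt (n : Int) : List Int → Option Int
  | [] => none
  | p :: rest => if p > n then some p else firstGt n rest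

def solution_alt (numbers : List Int) (n : Int) : Int :=
  (firstGt n (buildPrefixes 0 numbers)).getD 0

-- ===== PRECONDITION & SPEC =====
-- Pre_ excludes inputs on which no prefix sum exceeds n: there Python A (and B) return None, not an int.
def Pre_solution (numbers : List Int) (n : Int) : Prop :=
  ∃ k ∈ List.range numbers.length, n < (numbers.take (k + 1)).sum
instance (numbers : List Int) (n : Int) : Decidable (Pre_solution numbers n) := by
  unfold Pre_solution; infer_instance

def pvWitness_solution : List Int × Int := ([1], 0)

def Spec_solution (numbers : List Int) (n : Int) (out : Int) : Prop := out = solution_alt numbers n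
instance (numbers : List Int) (n : Int) (out : Int) : Decidable (Spec_solution numbers n out) := by unfold Spec_solution; infer_instance

-- ===== CLAIM (what is proved, stated in full; the proofs are below) =====
def Claim_equal_solution : Prop := ∀ (numbers : List Int) (n : Int), Dom_solution numbers n → Pre_solution numbers n → Spec_solution numbers n (solution numbers n)

-- ===== LEMMAS AND PROOFS =====
-- A's scan with accumulator a equals B's search over the prefix table started at a.sum.
theorem auxA_eq_firstGt (n : Int) (rest : List Int) : ∀ (a : List Int),
    solutionAuxA n a rest = firstGt n (buildPrefixes a.sum rest) := by
  induction rest with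
  | nil => intro a; rfl
  | cons x xs ih =>
      intro a
      simp only [solutionAuxA, buildPrefixes, firstGt, List.sum_append, List.sum_cons,
        List.sum_nil, add_zero]
      by_cases h : a.sum + x > n
      · simp [h]
      · simp [h, ih (a ++ [x])]

-- ===== VERDICT (by name: the statement is the Claim_ definition above) =====
theorem solution_spec : Claim_equal_solution := by
  intro numbers n _ _
  show solution numbers n = solution_alt numbers n
  unfold solution solution_alt
  rw [auxA_eq_firstGt n numbers []]
  rfl
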